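-- pv_equiv track=rewrite | github.com/inweb3/chatWeb3 | chat_ui.py | split_thought_process_text
-- ===== SOURCE A (Python) =====
-- def split_thought_process_text(text: str):
--     """
--     Splits the thought process text into sections.
--
--     Parameters:
--     text (str): The thought process text
--
--     Returns:
--     sections: The sections of the thought process
--     final_answer: The final answer from the thought process
--     """
--     thoughts = text.split("_Thought")
--     sections = []
--     for t in thoughts[1:]:
--         t = t.split("_Final answer")[0]
--         thought, action, observation = (
--             t.split("\n\nAction:\n\tTool:")[0],
--             "Tool:" + t.split("Tool:")[1].split("\n\nObservation:\n\t")[0],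
--             t.split("Observation:\n\t")[1],
--         )
--         sections.append((thought, action, observation))
--     final_answer = text.split("_Final answer_: ")[1]
--     return sections, final_answer
-- ===== SOURCE B (Python) =====
-- def split_thought_process_text(text: str):
--     """
--     Splits the thought process text into sections (find/partition scanner,
--     no intermediate split lists).
--     """
--     TH = "_Thought"
--
--     def cut(s, m):
--         # text of s before the first occurrence of m (all of s if absent)
--         return s.partition(m)[0]
--
--     def between(s, m):
--         # text strictly between the first (mandatory) and second occurrence of m
--         rest = s[s.index(m) + len(m):]
--         j = rest.find(m)
--         return rest if j == -1 else rest[:j]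
--
--     def blocks(rest):
--         # segments of rest delimited by further occurrences of TH
--         nxt = rest.find(TH)
--         if nxt == -1:
--             return [rest]
--         return [rest[:nxt]] + blocks(rest[nxt + len(TH):])
--
--     _, sep, rest = text.partition(TH)
--     raw = blocks(rest) if sep else []
--     sections = [
--         (cut(t, "\n\nAction:\n\tTool:"),
--          "Tool:" + cut(between(t, "Tool:"), "\n\nObservation:\n\t"),
--          between(t, "Observation:\n\t"))
--         for t in (cut(b, "_Final answer") for b in raw)
--     ]
--     return sections, between(text, "_Final answer_: ")
-- ===== Notes on version B (the rewrite author's own statement) =====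
-- stated objective: alternative
-- what changed: Replaces A's repeated .split(marker)[i] list-chopping with a partition/find scanner: blocks are peeled off the remainder by find, and each field is sliced out with partition-style cut/between helpers, so no intermediate split lists are built.
import Mathlib
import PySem

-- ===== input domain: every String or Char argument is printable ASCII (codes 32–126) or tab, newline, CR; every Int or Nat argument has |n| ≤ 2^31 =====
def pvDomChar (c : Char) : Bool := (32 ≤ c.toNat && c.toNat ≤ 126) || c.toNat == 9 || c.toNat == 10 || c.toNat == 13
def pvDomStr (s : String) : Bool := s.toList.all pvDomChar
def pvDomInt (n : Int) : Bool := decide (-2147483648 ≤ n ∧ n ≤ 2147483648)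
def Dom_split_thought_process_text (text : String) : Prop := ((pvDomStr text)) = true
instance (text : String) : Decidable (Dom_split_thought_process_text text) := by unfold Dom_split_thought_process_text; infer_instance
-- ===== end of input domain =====

-- B replaces A's repeated .split(marker)[i] list-chopping with a partition/find scanner
-- (blocks peeled off the remainder, fields sliced out by cut/between); alternative, same cost.


-- ===== PORT A =====
def split_thought_process_text (text : String) : (List (String × String × String)) × String :=
  let s := text.toList
  let thoughts := PySem.Chars.splitOn s "_Thought".toList
  let sections := (thoughts.drop 1).foldl (fun acc t0 =>
    let t := (PySem.Chars.splitOn t0 "_Final answer".toList).getD 0 []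
    let thought := (PySem.Chars.splitOn t "\n\nAction:\n\tTool:".toList).getD 0 []
    let action := "Tool:".toList ++
      (PySem.Chars.splitOn ((PySem.Chars.splitOn t "Tool:".toList).getD 1 [])
        "\n\nObservation:\n\t".toList).getD 0 []
    let observation := (PySem.Chars.splitOn t "Observation:\n\t".toList).getD 1 []
    acc ++ [(String.ofList thought, String.ofList action, String.ofList observation)]) []
  let final_answer := (PySem.Chars.splitOn s "_Final answer_: ".toList).getD 1 []
  (sections, String.ofList final_answer)

-- ===== PORT B =====
-- s.partition(m)[0]: everything before the first occurrence of m (all of s if absent)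
def pyCut (s m : List Char) : List Char :=
  let i := PySem.Chars.find s m
  if i = -1 then s else s.take i.toNat

-- s[s.index(m) + len(m):] of between(): Python raises ValueError when m is absent
-- (find = -1, excluded by Pre_); the port returns [] there
def pyAfter (s m : List Char) : List Char :=
  let i := PySem.Chars.find s m
  if i = -1 then [] else s.drop (i.toNat + m.length)

-- between(s, m) of Source B: strictly between the first (mandatory) and second occurrence of m
def pyBetween (s m : List Char) : List Char := pyCut (pyAfter s m) m

-- blocks(rest) of Source B: segments of rest delimited by further occurrences of "_Thought"
def pyBlocks (rest : List Char) : List (List Char) :=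
  if h : PySem.Chars.find rest "_Thought".toList = -1 then [rest]
  else [rest.take (PySem.Chars.find rest "_Thought".toList).toNat] ++
    pyBlocks (rest.drop ((PySem.Chars.find rest "_Thought".toList).toNat + "_Thought".toList.length))
termination_by rest.length
decreasing_by
  have hinf : "_Thought".toList <:+: rest := (PySem.Chars.find_ne_neg_one_iff _ _).mp h
  have hlen : "_Thought".toList.length ≤ rest.length := hinf.length_le
  have h8 : "_Thought".toList.length = 8 := by decide
  simp only [List.length_drop]
  omega

def split_thought_process_text_alt (text : String) : (List (String × String × String)) × String :=
  let s := text.toList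
  let raw := if PySem.Chars.find s "_Thought".toList = -1 then []
             else pyBlocks (pyAfter s "_Thought".toList)
  let sections := raw.map (fun b =>
    let t := pyCut b "_Final answer".toList
    (String.ofList (pyCut t "\n\nAction:\n\tTool:".toList),
     String.ofList ("Tool:".toList ++ pyCut (pyBetween t "Tool:".toList) "\n\nObservation:\n\t".toList),
     String.ofList (pyBetween t "Observation:\n\t".toList)))
  (sections, String.ofList (pyBetween s "_Final answer_: ".toList))

-- ===== PRECONDITION & SPEC =====
-- the block as A truncates it at "_Final answer" (stated with PySem primitives only)
def preTrunc (b : List Char) : List Char :=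
  if PySem.Chars.isIn "_Final answer".toList b then
    b.take (PySem.Chars.find b "_Final answer".toList).toNat
  else b

-- Pre_ excludes exactly the inputs on which the Python A raises IndexError (and B ValueError): texts missing
-- "_Final answer_: ", or containing a "_Thought" block whose truncation lacks "Tool:" or "Observation:\n\t".
def Pre_split_thought_process_text (text : String) : Prop :=
  PySem.Chars.isIn "_Final answer_: ".toList text.toList = true ∧
  ∀ b ∈ (PySem.Chars.splitOn text.toList "_Thought".toList).drop 1,
    PySem.Chars.isIn "Tool:".toList (preTrunc b) = true ∧
    PySem.Chars.isIn "Observation:\n\t".toList (preTrunc b) = true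
instance (text : String) : Decidable (Pre_split_thought_process_text text) := by
  unfold Pre_split_thought_process_text; infer_instance

def pvWitness_split_thought_process_text : String :=
  "Q_Thought: hm\n\nAction:\n\tTool: db\n\nObservation:\n\tok_Final answer_: 42"

def Spec_split_thought_process_text (text : String) (out : (List (String × String × String)) × String) : Prop := out = split_thought_process_text_alt text
instance (text : String) (out : (List (String × String × String)) × String) : Decidable (Spec_split_thought_process_text text out) := by unfold Spec_split_thought_process_text; infer_instance

-- ===== CLAIM (what is proved, stated in full; the proofs are below) =====
def Claim_equal_split_thought_process_text : Prop := ∀ (text : String), Dom_split_thought_process_text text → Pre_split_thought_process_text text → Spec_split_thought_process_text text (split_thought_process_text text)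

-- ===== LEMMAS AND PROOFS =====

-- structural recursion computing Python's s.split(a::m): the bridge between A's splitOn
-- and B's find-based scanning
def splitRec (a : Char) (m : List Char) : List Char → List (List Char)
  | [] => [[]]
  | c :: rest =>
    if (a :: m).isPrefixOf (c :: rest) then
      [] :: splitRec a m (rest.drop m.length)
    else
      (splitRec a m rest).modifyHead (c :: ·)
termination_by l => l.length
decreasing_by
  · simp only [List.length_drop, List.length_cons]; omega
  · simp


theorem go_eq (a : Char) (m : List Char) :
    ∀ (fuel : Nat) (l cur : List Char) (acc : List (List Char)), l.length < fuel →
      PySem.Chars.splitOn.go (a :: m) fuel l cur acc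
        = acc.reverse ++ (splitRec a m l).modifyHead (cur.reverse ++ ·) := by
  intro fuel
  induction fuel with
  | zero => intro l cur acc h; omega
  | succ f ih =>
    intro l cur acc h
    match l with
    | [] =>
      show PySem.Chars.splitOn.go (a :: m) (f+1) [] cur acc = _
      rw [PySem.Chars.splitOn.go]
      · simp [splitRec]
      · omega
    | c :: rest =>
      rw [PySem.Chars.splitOn.go]
      by_cases hp : (a :: m).isPrefixOf (c :: rest)
      · simp only [hp, if_true]
        have hlt : (rest.drop m.length).length < f := by
          simp only [List.length_drop]
          simp only [List.length_cons] at h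
          omega
        have : List.drop (a :: m).length (c :: rest) = rest.drop m.length := by
          simp
        rw [this, ih _ [] (cur.reverse :: acc) hlt]
        rw [splitRec]
        simp only [hp, if_true, List.reverse_cons, List.reverse_nil, List.nil_append,
          List.modifyHead_cons, List.append_assoc, List.singleton_append]
        rw [show (fun x : List Char => x) = id from rfl, List.modifyHead_id]
        simp
      · simp only [hp]
        have hlt : rest.length < f := by simp at h; omega
        rw [ih _ (c :: cur) acc hlt]
        rw [splitRec]
        simp only [hp]
        rcases hrec : splitRec a m rest with _ | ⟨hd, tl⟩
        · simp
        · simp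

theorem splitRec_ne_nil (a : Char) (m l : List Char) : splitRec a m l ≠ [] := by
  fun_induction splitRec a m l with
  | case1 => simp
  | case2 => simp
  | case3 c rest _ ih =>
    rcases h : splitRec a m rest with _ | ⟨hd, tl⟩
    · exact absurd h ih
    · simp

theorem splitOn_eq (a : Char) (m : List Char) (s : List Char) :
    PySem.Chars.splitOn s (a :: m) = splitRec a m s := by
  unfold PySem.Chars.splitOn
  rw [go_eq a m (s.length + 1) s [] [] (by omega)]
  rcases h : splitRec a m s with _ | ⟨hd, tl⟩
  · exact absurd h (splitRec_ne_nil a m s)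
  · simp

theorem find_eq_of (s sub : List Char) (n : Nat) (h1 : sub <+: s.drop n)
    (h2 : ∀ i < n, ¬ sub <+: s.drop i) : PySem.Chars.find s sub = n := by
  have hinf : sub <:+: s := h1.isInfix.trans (List.drop_suffix n s).isInfix
  have h0 : 0 ≤ PySem.Chars.find s sub := (PySem.Chars.find_nonneg_iff _ _).mpr hinf
  obtain ⟨hp, hmin⟩ := PySem.Chars.find_spec (s := s) (sub := sub) h0
  have heq : (PySem.Chars.find s sub).toNat = n := by
    rcases lt_trichotomy (PySem.Chars.find s sub).toNat n with hlt | he | hgt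
    · exact absurd hp (h2 _ hlt)
    · exact he
    · exact absurd h1 (hmin n hgt)
  omega

theorem find_of_prefix (s sub : List Char) (h : sub <+: s) : PySem.Chars.find s sub = 0 := by
  exact find_eq_of s sub 0 (by simpa) (by omega)

theorem find_cons (c : Char) (rest sub : List Char) (h : ¬ sub <+: (c :: rest)) :
    PySem.Chars.find (c :: rest) sub =
      if PySem.Chars.find rest sub = -1 then -1 else 1 + PySem.Chars.find rest sub := by
  split
  · next hr =>
    rw [PySem.Chars.find_eq_neg_one_iff] at hr ⊢
    intro hinf
    rcases List.infix_cons_iff.mp hinf with hpre | hinf'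
    · exact h hpre
    · exact hr hinf'
  · next hr =>
    have h0 : 0 ≤ PySem.Chars.find rest sub := by
      have := PySem.Chars.neg_one_le_find rest sub
      omega
    obtain ⟨hp, hmin⟩ := PySem.Chars.find_spec (s := rest) (sub := sub) h0
    have := find_eq_of (c :: rest) sub ((PySem.Chars.find rest sub).toNat + 1)
      (by simpa using hp)
      (by
        intro i hi
        match i with
        | 0 => simpa using h
        | j + 1 =>
          simp only [List.drop_succ_cons]
          exact hmin j (by omega))
    rw [this]
    omega

theorem splitRec_find (a : Char) (m : List Char) (l : List Char) :
    splitRec a m l =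
      if PySem.Chars.find l (a :: m) = -1 then [l]
      else l.take (PySem.Chars.find l (a :: m)).toNat ::
        splitRec a m (l.drop ((PySem.Chars.find l (a :: m)).toNat + (a :: m).length)) := by
  induction l with
  | nil =>
    have : PySem.Chars.find [] (a :: m) = -1 := by
      rw [PySem.Chars.find_eq_neg_one_iff]
      simp [List.infix_nil]
    simp [this, splitRec]
  | cons c rest ih =>
    by_cases hp : (a :: m) <+: (c :: rest)
    · have hf : PySem.Chars.find (c :: rest) (a :: m) = 0 := find_of_prefix _ _ hp
      rw [splitRec.eq_def]
      simp only [List.isPrefixOf_iff_prefix.mpr hp, if_true, hf]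
      norm_num
    · have hnp : ¬ (a :: m).isPrefixOf (c :: rest) = true := by
        rw [List.isPrefixOf_iff_prefix]; exact hp
      rw [splitRec.eq_def]
      simp only [hnp]
      rw [ih, find_cons c rest (a :: m) hp]
      by_cases hr : PySem.Chars.find rest (a :: m) = -1
      · simp [hr]
      · have h0 : 0 ≤ PySem.Chars.find rest (a :: m) := by
          have := PySem.Chars.neg_one_le_find rest (a :: m)
          omega
        simp only [hr, if_false]
        have hne : ¬ (1 + PySem.Chars.find rest (a :: m) = -1) := by omega
        simp only [hne, if_false]
        have htn : (1 + PySem.Chars.find rest (a :: m)).toNat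
            = (PySem.Chars.find rest (a :: m)).toNat + 1 := by omega
        rw [htn]
        have hc : (PySem.Chars.find rest (a :: m)).toNat + 1 + (a :: m).length
            = ((PySem.Chars.find rest (a :: m)).toNat + (a :: m).length) + 1 := by omega
        rw [hc]
        simp [List.modifyHead]


theorem splitRec_getD0 (a : Char) (m t : List Char) :
    (splitRec a m t).getD 0 [] = pyCut t (a :: m) := by
  rw [splitRec_find]
  unfold pyCut
  by_cases h : PySem.Chars.find t (a :: m) = -1 <;> simp [h]

theorem splitOn_getD0 (a : Char) (m t : List Char) :
    (PySem.Chars.splitOn t (a :: m)).getD 0 [] = pyCut t (a :: m) := by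
  rw [splitOn_eq, splitRec_getD0]

theorem splitOn_getD1 (a : Char) (m t : List Char) :
    (PySem.Chars.splitOn t (a :: m)).getD 1 [] = pyBetween t (a :: m) := by
  rw [splitOn_eq, splitRec_find]
  unfold pyBetween pyAfter
  by_cases h : PySem.Chars.find t (a :: m) = -1
  · simp only [h, if_true]
    have : PySem.Chars.find [] (a :: m) = -1 := by
      rw [PySem.Chars.find_eq_neg_one_iff]; simp [List.infix_nil]
    simp [pyCut, this]
  · simp only [h, if_false, List.getD_cons_succ]
    rw [splitRec_getD0]

theorem pyBlocks_eq (rest : List Char) :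
    pyBlocks rest = splitRec '_' "Thought".toList rest := by
  fun_induction pyBlocks rest with
  | case1 r h =>
    rw [splitRec_find]
    have : PySem.Chars.find r ('_' :: "Thought".toList) = -1 := by
      have e : ('_' :: "Thought".toList) = "_Thought".toList := by decide
      rw [e]; exact h
    rw [if_pos this]
  | case2 r h ih =>
    rw [splitRec_find]
    have e : ('_' :: "Thought".toList) = "_Thought".toList := by decide
    rw [e]
    simp only [h, if_false]
    rw [ih]
    simp

theorem main_eq (text : String) :
    split_thought_process_text text = split_thought_process_text_alt text := by
  simp only [split_thought_process_text, split_thought_process_text_alt]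
  rw [PySem.List.foldl_append_singleton_eq_map, List.nil_append]
  have efam : "_Final answer".toList = '_' :: "Final answer".toList := by decide
  have eact : "\n\nAction:\n\tTool:".toList = '\n' :: "\nAction:\n\tTool:".toList := by decide
  have etool : "Tool:".toList = 'T' :: "ool:".toList := by decide
  have eobs2 : "\n\nObservation:\n\t".toList = '\n' :: "\nObservation:\n\t".toList := by decide
  have eobs : "Observation:\n\t".toList = 'O' :: "bservation:\n\t".toList := by decide
  have efa : "_Final answer_: ".toList = '_' :: "Final answer_: ".toList := by decide
  have eth : "_Thought".toList = '_' :: "Thought".toList := by decide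
  have hblocks : (PySem.Chars.splitOn text.toList "_Thought".toList).drop 1
      = (if PySem.Chars.find text.toList "_Thought".toList = -1 then []
         else pyBlocks (pyAfter text.toList "_Thought".toList)) := by
    rw [eth, splitOn_eq, splitRec_find]
    by_cases h : PySem.Chars.find text.toList ('_' :: "Thought".toList) = -1
    · rw [if_pos h, if_pos h]
      rfl
    · rw [if_neg h, List.drop_one, List.tail_cons, pyBlocks_eq]
      have hA : pyAfter text.toList ('_' :: "Thought".toList)
          = List.drop ((PySem.Chars.find text.toList ('_' :: "Thought".toList)).toNat
              + ('_' :: "Thought".toList).length) text.toList := by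
        simp only [pyAfter]
        rw [if_neg h]
      rw [hA, if_neg h]
  have hfa : (PySem.Chars.splitOn text.toList "_Final answer_: ".toList).getD 1 []
      = pyBetween text.toList "_Final answer_: ".toList := by
    rw [efa, splitOn_getD1, ← efa]
  rw [hblocks, hfa]
  congr 1
  refine List.map_congr_left ?_
  intro t0 _
  rw [efam, splitOn_getD0, ← efam]
  rw [eact, splitOn_getD0, ← eact]
  rw [etool, splitOn_getD1, ← etool]
  rw [eobs2, splitOn_getD0, ← eobs2]
  rw [eobs, splitOn_getD1, ← eobs]


-- ===== VERDICT (by name: the statement is the Claim_ definition above) =====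
theorem split_thought_process_text_spec : Claim_equal_split_thought_process_text := by
  intro text _ _
  unfold Spec_split_thought_process_text
  exact main_eq text
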